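-- pv_equiv track=rewrite | github.com/21mdr1/AoC2024 | day8/part1.py | parse_map
-- ===== SOURCE A (Python) =====
-- def parse_map(antenna_map):
--     antennas = dict()
--
--     for i, j in [(i, j) for i in range(len(antenna_map)) for j in range(len(antenna_map))]:
--         if antenna_map[i][j] != '.':
--
--             if antenna_map[i][j] not in antennas:
--                 antennas[antenna_map[i][j]] = []
--
--             antennas[antenna_map[i][j]].append((i, j))
--
--     return antennas
-- ===== SOURCE B (Python) =====
-- def parse_map(antenna_map):
--     n = len(antenna_map)
--     cells = [(antenna_map[i][j], (i, j))
--              for i in range(n) for j in range(n)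
--              if antenna_map[i][j] != '.']
--     keys = []
--     for c, _ in cells:
--         if c not in keys:
--             keys.append(c)
--     return {c: [p for ch, p in cells if ch == c] for c in keys}
-- ===== Notes on version B (the rewrite author's own statement) =====
-- stated objective: alternative
-- what changed: Replaced A's incremental per-cell dict bucketing (conditional fresh-key insert then append inside the grid loop) with a build-then-group pipeline: build the flat filtered cell list once, collect distinct keys in order of first appearance, then emit each key's coordinates by a filter pass over the cell list.
import Mathlib
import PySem

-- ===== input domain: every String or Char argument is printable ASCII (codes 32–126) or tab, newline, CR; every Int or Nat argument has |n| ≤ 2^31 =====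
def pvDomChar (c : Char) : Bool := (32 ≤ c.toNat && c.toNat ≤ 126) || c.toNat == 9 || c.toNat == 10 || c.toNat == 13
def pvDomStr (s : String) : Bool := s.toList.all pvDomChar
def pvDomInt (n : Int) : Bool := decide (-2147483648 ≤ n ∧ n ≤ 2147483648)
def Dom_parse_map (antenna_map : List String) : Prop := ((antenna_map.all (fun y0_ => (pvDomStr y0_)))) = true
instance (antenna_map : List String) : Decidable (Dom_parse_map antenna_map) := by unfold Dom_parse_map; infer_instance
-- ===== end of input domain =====

-- B replaces A's incremental per-cell dict bucketing by a build-cells / collect-keys / group-by-key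
-- pipeline (alternative decomposition, same asymptotic cost on the grid scan).

-- ===== PORT A =====
-- antenna_map[i][j] as the 1-character string Python yields ("" only where Python would raise
-- IndexError, which Pre_parse_map excludes)
def cellStr (antenna_map : List String) (i j : Int) : String :=
  match PySem.Str.pyGet? (PySem.List.pyGetD antenna_map i "") j with
  | some c => String.ofList [c]
  | none => ""

def parse_map (antenna_map : List String) : List (String × List (Int × Int)) :=
  let n : Int := antenna_map.length
  let idx := (PySem.List.pyRange 0 n 1).flatMap
      (fun i => (PySem.List.pyRange 0 n 1).map (fun j => (i, j)))
  (idx.foldl (fun (d : PySem.Dict String (List (Int × Int))) ij =>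
      let c := cellStr antenna_map ij.1 ij.2
      if c ≠ "." then
        (if d.contains c then d else d.insert c []).modify c [] (fun l => l ++ [ij])
      else d) PySem.Dict.empty).items

-- ===== PORT B =====
def parse_map_alt (antenna_map : List String) : List (String × List (Int × Int)) :=
  let n : Int := antenna_map.length
  let cells := (PySem.List.pyRange 0 n 1).flatMap (fun i =>
      (PySem.List.pyRange 0 n 1).flatMap (fun j =>
        let c := cellStr antenna_map i j
        if c ≠ "." then [(c, (i, j))] else []))
  let keys := cells.foldl
      (fun (ks : List String) cp => if cp.1 ∈ ks then ks else ks ++ [cp.1]) []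
  keys.map (fun c => (c, (cells.filter (fun cp => cp.1 == c)).map (fun cp => cp.2)))

-- ===== PRECONDITION & SPEC =====
-- Pre_ excludes exactly the inputs where Python A raises IndexError: A indexes every row at
-- columns 0..len(antenna_map)-1, so every row must be at least as long as the grid is high.
def Pre_parse_map (antenna_map : List String) : Prop :=
  ∀ s ∈ antenna_map, (antenna_map.length : Int) ≤ PySem.Str.len s
instance (antenna_map : List String) : Decidable (Pre_parse_map antenna_map) := by
  unfold Pre_parse_map; infer_instance

def pvWitness_parse_map : List String := ["ab", ".a"]

def Spec_parse_map (antenna_map : List String) (out : List (String × List (Int × Int))) : Prop := out = parse_map_alt antenna_map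
instance (antenna_map : List String) (out : List (String × List (Int × Int))) : Decidable (Spec_parse_map antenna_map out) := by unfold Spec_parse_map; infer_instance

-- ===== CLAIM (what is proved, stated in full; the proofs are below) =====
def Claim_equal_parse_map : Prop := ∀ (antenna_map : List String), Dom_parse_map antenna_map → Pre_parse_map antenna_map → Spec_parse_map antenna_map (parse_map antenna_map)

-- ===== LEMMAS AND PROOFS =====

-- A's loop body (conditional fresh-key insert, then append) is exactly dict-modify-append.
theorem stepA_eq_modify (d : PySem.Dict String (List (Int × Int))) (c : String) (p : Int × Int) :
    (if d.contains c then d else d.insert c []).modify c [] (fun l => l ++ [p])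
      = d.modify c [] (fun l => l ++ [p]) := by
  by_cases h : d.contains c = true
  · simp [h]
  · rw [if_neg (by simp [h]), PySem.Dict.modify, PySem.Dict.modify,
      PySem.Dict.getD_insert_self, PySem.Dict.insert_insert_self]
    have h0 : d.getD c [] = [] := PySem.Dict.getD_of_not_contains d [] (by simpa using h)
    rw [h0]

-- Folding A's guarded step over index pairs = folding modify-append over the filtered cells.
theorem foldA_eq_fold_cells (am : List String) (l : List (Int × Int))
    (d : PySem.Dict String (List (Int × Int))) :
    l.foldl (fun d ij =>
        if cellStr am ij.1 ij.2 ≠ "." then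
          (if d.contains (cellStr am ij.1 ij.2) then d
           else d.insert (cellStr am ij.1 ij.2) []).modify (cellStr am ij.1 ij.2) []
            (fun l => l ++ [ij])
        else d) d
      = (l.flatMap (fun ij =>
          if cellStr am ij.1 ij.2 ≠ "." then [(cellStr am ij.1 ij.2, ij)] else [])).foldl
          (fun d cp => d.modify cp.1 [] (fun l => l ++ [cp.2])) d := by
  induction l generalizing d with
  | nil => rfl
  | cons x xs ih =>
    simp only [List.foldl_cons, List.flatMap_cons]
    by_cases hx : cellStr am x.1 x.2 ≠ "."
    · simp only [if_pos hx, List.singleton_append, List.foldl_cons]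
      rw [stepA_eq_modify]
      exact ih _
    · simp only [if_neg hx, List.nil_append]
      exact ih d

-- a comprehension over the pair list is the nested comprehension
theorem flatMap_pairs (l r : List Int) (f : Int × Int → List (String × (Int × Int))) :
    (l.flatMap (fun i => r.map (fun j => (i, j)))).flatMap f
      = l.flatMap (fun i => r.flatMap (fun j => f (i, j))) := by
  induction l with
  | nil => rfl
  | cons a as ih => simp [List.flatMap_cons, List.flatMap_append, ih, List.flatMap_map]

-- the dict built by repeated modify-append, listed as items, is B's group-by-first-key pipeline
theorem grouped (cells : List (String × (Int × Int))) :
    (cells.foldl (fun d cp => d.modify cp.1 [] (fun l => l ++ [cp.2]))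
      (PySem.Dict.empty : PySem.Dict String (List (Int × Int)))).items
      = (cells.foldl (fun (ks : List String) cp => if cp.1 ∈ ks then ks else ks ++ [cp.1]) []).map
          (fun c => (c, (cells.filter (fun cp => cp.1 == c)).map (fun cp => cp.2))) := by
  set D : PySem.Dict String (List (Int × Int)) :=
      cells.foldl (fun d cp => d.modify cp.1 [] (fun l => l ++ [cp.2])) PySem.Dict.empty with hD
  have hnd : D.keys.Nodup := by
    rw [hD]
    exact PySem.Dict.nodup_keys_foldl_modify_key cells Prod.fst []
      (fun d cp => fun l => l ++ [cp.2]) PySem.Dict.empty PySem.Dict.nodup_keys_empty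
  have hkeys : D.keys = cells.foldl
      (fun (ks : List String) cp => if cp.1 ∈ ks then ks else ks ++ [cp.1]) [] := by
    rw [hD, PySem.Dict.keys_foldl_modify_key (key := Prod.fst)
        (f := fun d cp => fun l => l ++ [cp.2]) (d0 := []),
      PySem.Dict.keys_empty, PySem.Set.update_map_eq_foldl_add]
    exact PySem.List.foldl_congr_mem cells
      (fun s b => PySem.Set.add s b.1)
      (fun ks cp => if cp.1 ∈ ks then ks else ks ++ [cp.1]) []
      (fun s cp _ => PySem.Set.add_eq_ite s cp.1)
  rw [PySem.Dict.items_eq_map_keys D hnd [], hkeys]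
  refine List.map_congr_left fun c _ => ?_
  have hg : D.getD c [] = (cells.filter (fun cp => cp.1 == c)).map (fun cp => cp.2) := by
    rw [hD, PySem.Dict.getD_foldl_modify_append, PySem.Dict.getD_empty, List.nil_append]
  rw [hg]

theorem parse_map_eq_alt (am : List String) : parse_map am = parse_map_alt am := by
  unfold parse_map parse_map_alt
  simp only [foldA_eq_fold_cells, flatMap_pairs]
  exact grouped _

-- ===== VERDICT (by name: the statement is the Claim_ definition above) =====
theorem parse_map_spec : Claim_equal_parse_map := by
  intro am _ _
  unfold Spec_parse_map
  exact parse_map_eq_alt am
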